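-- pv_equiv track=rewrite | github.com/YoungchanChang/python-mecab-ner | python_mecab_ner/mecab_ner.py | gen_integrated_entity
-- ===== SOURCE A (Python) =====
-- from typing import List, Generator, Iterable
--
-- FULL_WORD = 1
--
-- def gen_integrated_entity(blank_list: List) -> Generator:
--
--     """
--     1로 채워진 리스트의 시작점과 끝점을 반환
--     """
--
--     start_idx = None
--     end_idx = None
--     is_word_start = False
--     for idx, item in enumerate(blank_list):
--         if item == FULL_WORD: # 1이 채워진 단어에 대해서 수행
--             end_idx = idx # 끝단어를 시작점으로 잡는다.
--
--             if is_word_start is False: # 1로 채워진 단어의 시작이라면, 시작점을 현 인덱스로 저장한다.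
--                 start_idx = idx
--                 is_word_start = True
--
--             if idx != len(blank_list) - 1: # 인덱스가 끝이 아니라면, 다음 단어를 탐색한다.
--                 continue
--
--         if (is_word_start is True) and (end_idx is not None):
--             yield start_idx, end_idx
--             start_idx = None
--             end_idx = None
--             is_word_start = False # 단어 초기화
--             continue
-- ===== SOURCE B (Python) =====
-- FULL_WORD = 1
--
-- def gen_integrated_entity(blank_list):
--     """Two-pointer scan: find each run of FULL_WORD and yield its inclusive bounds."""
--     i = 0
--     n = len(blank_list)
--     while i < n:
--         if blank_list[i] == FULL_WORD:
--             j = i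
--             while j + 1 < n and blank_list[j + 1] == FULL_WORD:
--                 j += 1
--             yield i, j
--             i = j + 1
--         else:
--             i += 1
-- ===== Notes on version B (the rewrite author's own statement) =====
-- stated objective: simpler
-- what changed: Replaced A's single pass with start/end sentinels, a word-start flag and a special last-index branch by a two-pointer scan: find the start of each run of 1s, advance an inner pointer to the run's end, yield the pair, and resume after the run.
import Mathlib
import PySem

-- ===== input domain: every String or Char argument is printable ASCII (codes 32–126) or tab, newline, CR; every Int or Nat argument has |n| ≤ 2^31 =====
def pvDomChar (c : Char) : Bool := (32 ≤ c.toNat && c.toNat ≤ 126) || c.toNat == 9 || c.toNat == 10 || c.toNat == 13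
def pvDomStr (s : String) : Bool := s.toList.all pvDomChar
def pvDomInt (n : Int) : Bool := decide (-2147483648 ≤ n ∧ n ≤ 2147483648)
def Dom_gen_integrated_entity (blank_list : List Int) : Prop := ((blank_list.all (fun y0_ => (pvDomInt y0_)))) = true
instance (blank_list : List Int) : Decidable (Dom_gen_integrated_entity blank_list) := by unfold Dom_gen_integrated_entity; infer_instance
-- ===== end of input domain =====

-- B replaces A's flag/sentinel single pass with a two-pointer scan (find run start, then its end); objective: simpler.

-- ===== PORT A =====
-- state: start_idx, end_idx (Options, as in Python), is_word_start, current idx; bl_last = len(blank_list)-1.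
-- `.getD 0` only reads the yield values; at every yield both options are `some` (guarded by the same
-- condition Python checks), so it is exact.
def pvALoop (bl_last : Int) (start_idx end_idx : Option Int) (is_word_start : Bool)
    (idx : Int) : List Int → List (Int × Int)
  | [] => []
  | item :: rest =>
    if item = 1 then
      let end_idx := some idx
      let (start_idx, is_word_start) :=
        if is_word_start = false then (some idx, true) else (start_idx, is_word_start)
      if idx ≠ bl_last then
        pvALoop bl_last start_idx end_idx is_word_start (idx + 1) rest
      else
        if is_word_start = true ∧ end_idx.isSome then
          (start_idx.getD 0, end_idx.getD 0) :: pvALoop bl_last none none false (idx + 1) rest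
        else
          pvALoop bl_last start_idx end_idx is_word_start (idx + 1) rest
    else
      if is_word_start = true ∧ end_idx.isSome then
        (start_idx.getD 0, end_idx.getD 0) :: pvALoop bl_last none none false (idx + 1) rest
      else
        pvALoop bl_last start_idx end_idx is_word_start (idx + 1) rest

def gen_integrated_entity (blank_list : List Int) : List (Int × Int) :=
  pvALoop ((blank_list.length : Int) - 1) none none false 0 blank_list

-- ===== PORT B =====
-- inner while loop of Source B: consume the rest of a run of 1s; returns (last index of the run, remaining suffix)
def pvSkipRun (j : Int) : List Int → Int × List Int
  | [] => (j, [])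
  | y :: ys => if y = 1 then pvSkipRun (j + 1) ys else (j, y :: ys)

theorem pvSkipRun_len_le (j : Int) (l : List Int) : (pvSkipRun j l).2.length ≤ l.length := by
  induction l generalizing j with
  | nil => simp [pvSkipRun]
  | cons y ys ih =>
    simp only [pvSkipRun]
    split
    · exact le_trans (ih _) (Nat.le_succ _)
    · simp

-- outer while loop of Source B
def pvBLoop (i : Int) : List Int → List (Int × Int)
  | [] => []
  | x :: xs =>
    if x = 1 then
      let p := pvSkipRun i xs
      (i, p.1) :: pvBLoop (p.1 + 1) p.2
    else
      pvBLoop (i + 1) xs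
termination_by l => l.length
decreasing_by
· exact Nat.lt_succ_of_le (pvSkipRun_len_le i xs)
· simp

def gen_integrated_entity_alt (blank_list : List Int) : List (Int × Int) :=
  pvBLoop 0 blank_list

-- ===== PRECONDITION & SPEC =====
def Spec_gen_integrated_entity (blank_list : List Int) (out : List (Int × Int)) : Prop := out = gen_integrated_entity_alt blank_list
instance (blank_list : List Int) (out : List (Int × Int)) : Decidable (Spec_gen_integrated_entity blank_list out) := by unfold Spec_gen_integrated_entity; infer_instance

-- ===== CLAIM (what is proved, stated in full; the proofs are below) =====
def Claim_equal_gen_integrated_entity : Prop := ∀ (blank_list : List Int), Dom_gen_integrated_entity blank_list → Spec_gen_integrated_entity blank_list (gen_integrated_entity blank_list)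

-- ===== LEMMAS AND PROOFS =====

-- Mutual invariant: (1) from the idle state A's loop computes B's loop;
-- (2) inside a run started at s, with end_idx = idx - 1 pending, A's loop yields
-- (s, run end) and continues like B after the run.
theorem pvLoop_main (l : List Int) :
    ∀ (last idx s : Int),
      (idx + l.length = last + 1 →
        pvALoop last none none false idx l = pvBLoop idx l)
      ∧ (idx + l.length = last + 1 → idx ≤ last →
        pvALoop last (some s) (some (idx - 1)) true idx l =
          (s, (pvSkipRun (idx - 1) l).1) ::
            pvBLoop ((pvSkipRun (idx - 1) l).1 + 1) (pvSkipRun (idx - 1) l).2) := by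
  induction l with
  | nil =>
    intro last idx s
    refine ⟨fun _ => by simp [pvALoop, pvBLoop], fun h1 h2 => ?_⟩
    simp at h1; omega
  | cons item rest ih =>
    intro last idx s
    constructor
    · intro hlen
      simp only [List.length_cons] at hlen
      by_cases hi : item = 1
      · subst hi
        by_cases hlast : idx = last
        · have : rest = [] := by
            cases rest with
            | nil => rfl
            | cons a b => simp at hlen; omega
          subst this
          simp [pvALoop, pvBLoop, pvSkipRun, hlast]
        · have h2 : idx + 1 + (rest.length : Int) = last + 1 := by push_cast at hlen ⊢ <;> omega
          have h3 : idx + 1 ≤ last := by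
            cases rest with
            | nil => simp at hlen; omega
            | cons a b => simp at hlen; push_cast at hlen; omega
          have := (ih last (idx + 1) idx).2 h2 h3
          have he : idx + 1 - 1 = idx := by omega
          rw [he] at this
          simp [pvALoop, pvBLoop, hlast, this]
      · have h2 : idx + 1 + (rest.length : Int) = last + 1 := by push_cast at hlen ⊢ <;> omega
        have := (ih last (idx + 1) s).1 h2
        simp [pvALoop, pvBLoop, hi, this]
    · intro hlen hle
      simp only [List.length_cons] at hlen
      by_cases hi : item = 1
      · subst hi
        by_cases hlast : idx = last
        · have : rest = [] := by
            cases rest with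
            | nil => rfl
            | cons a b => simp at hlen; omega
          subst this
          simp [pvALoop, pvBLoop, pvSkipRun, hlast]
        · have h2 : idx + 1 + (rest.length : Int) = last + 1 := by push_cast at hlen ⊢ <;> omega
          have h3 : idx + 1 ≤ last := by omega
          have := (ih last (idx + 1) s).2 h2 h3
          have he : idx + 1 - 1 = idx := by omega
          rw [he] at this
          simp [pvALoop, pvSkipRun, hlast, this]
      · have h2 : idx + 1 + (rest.length : Int) = last + 1 := by push_cast at hlen ⊢ <;> omega
        have := (ih last (idx + 1) s).1 h2
        simp [pvALoop, pvBLoop, pvSkipRun, hi, this]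

-- ===== VERDICT (by name: the statement is the Claim_ definition above) =====
theorem gen_integrated_entity_spec : Claim_equal_gen_integrated_entity := by
  intro blank_list _
  unfold Spec_gen_integrated_entity gen_integrated_entity gen_integrated_entity_alt
  exact (pvLoop_main blank_list ((blank_list.length : Int) - 1) 0 0).1 (by omega)
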